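-- pv_equiv track=rewrite | github.com/theghostshinobi/BRUTAL-GORILLA | analysis_bypass.py | _heuristic_vulns
-- ===== SOURCE A (Python) =====
-- from typing import Any, Dict, List, Optional, Tuple
--
-- def _heuristic_vulns(archetype: str, hints: List[str], status: int, ctype: str,
--                      body_snip: str, knowledge: Optional[Dict[str, Any]]) -> List[str]:
--     candidates: List[str] = []
--     if archetype == "login":
--         candidates += ["weak_auth", "rate_limit", "2fa_missing"]
--     if archetype == "search":
--         candidates += ["xss_reflected", "sqli_like"]
--     if archetype == "upload":
--         candidates += ["upload_bypass", "content_type_mismatch"]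
--     if archetype == "admin":
--         candidates += ["idor", "weak_auth", "csrf"]
--     if archetype == "api":
--         candidates += ["idor", "mass_assignment", "sqli_like"]
--         if "graphql" in hints:
--             candidates += ["graphql_introspection", "graphql_injection"]
--     if archetype == "callback":
--         candidates += ["open_redirect", "csrf"]
--
--     if 500 <= int(status) <= 599:
--         candidates.append("error_leak")
--     if "json" in ctype:
--         candidates.append("json_misuse")
--
--     # Optional knowledge-based enrich
--     if knowledge and isinstance(knowledge.get("vuln_bias"), dict):
--         for v, w in knowledge["vuln_bias"].items():
--             if isinstance(w, (int, float)) and w > 0 and v not in candidates: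
--                 candidates.append(v)
--
--     return sorted(set(candidates))
-- ===== SOURCE B (Python) =====
-- from typing import Any, Dict, List, Optional, Tuple
--
-- # Inverted index: for each built-in vulnerability tag, the archetypes that imply it.
-- TAG_ARCHETYPES: Dict[str, Tuple[str, ...]] = {
--     "weak_auth": ("login", "admin"),
--     "rate_limit": ("login",),
--     "2fa_missing": ("login",),
--     "xss_reflected": ("search",),
--     "sqli_like": ("search", "api"),
--     "upload_bypass": ("upload",),
--     "content_type_mismatch": ("upload",),
--     "idor": ("admin", "api"),
--     "mass_assignment": ("api",),
--     "csrf": ("admin", "callback"),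
--     "open_redirect": ("callback",),
-- }
--
-- def _heuristic_vulns(archetype: str, hints: List[str], status: int, ctype: str,
--                      body_snip: str, knowledge: Optional[Dict[str, Any]]) -> List[str]:
--     out = {tag for tag, archs in TAG_ARCHETYPES.items() if archetype in archs}
--     if archetype == "api" and "graphql" in hints:
--         out |= {"graphql_introspection", "graphql_injection"}
--     if 500 <= int(status) <= 599:
--         out.add("error_leak")
--     if "json" in ctype:
--         out.add("json_misuse")
--     if knowledge:
--         bias = knowledge.get("vuln_bias")
--         if isinstance(bias, dict):
--             out |= {v for v, w in bias.items()
--                     if isinstance(w, (int, float)) and w > 0}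
--     return sorted(out)
-- ===== Notes on version B (the rewrite author's own statement) =====
-- stated objective: alternative
-- what changed: B inverts the rule base: instead of appending archetype-keyed candidate lists and deduplicating at the end, it iterates over an inverted index tag->archetypes, computing for each vulnerability tag whether the archetype implies it, accumulates everything in a set from the start, and sorts that set; the bias loop with its per-entry membership scan becomes a set union of a filtered comprehension.
import Mathlib
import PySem

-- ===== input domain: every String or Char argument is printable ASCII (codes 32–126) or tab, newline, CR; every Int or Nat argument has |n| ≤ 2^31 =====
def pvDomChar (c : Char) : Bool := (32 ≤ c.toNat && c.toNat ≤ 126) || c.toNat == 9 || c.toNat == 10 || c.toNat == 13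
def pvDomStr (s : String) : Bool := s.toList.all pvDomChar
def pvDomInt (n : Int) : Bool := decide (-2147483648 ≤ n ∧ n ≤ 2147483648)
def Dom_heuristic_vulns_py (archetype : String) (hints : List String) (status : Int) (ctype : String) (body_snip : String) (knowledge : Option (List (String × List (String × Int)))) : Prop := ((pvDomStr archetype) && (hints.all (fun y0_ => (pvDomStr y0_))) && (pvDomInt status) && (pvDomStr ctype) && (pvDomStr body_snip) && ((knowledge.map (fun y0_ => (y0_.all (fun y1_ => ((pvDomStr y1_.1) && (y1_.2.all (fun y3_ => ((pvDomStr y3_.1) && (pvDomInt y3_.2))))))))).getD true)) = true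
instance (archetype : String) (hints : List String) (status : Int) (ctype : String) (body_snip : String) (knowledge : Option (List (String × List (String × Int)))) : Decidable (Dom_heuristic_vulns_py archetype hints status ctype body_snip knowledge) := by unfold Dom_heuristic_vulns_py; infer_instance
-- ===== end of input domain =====

-- B inverts the rule base: it decides, per vulnerability tag of an inverted index
-- tag -> archetypes, whether the tag applies, accumulating in a set from the start
-- and sorting it, instead of A's append-then-dedup if-chain (alternative, same cost class).


-- ===== PORT A =====
-- Literal transliteration of A: the if-chain appends, the nested graphql branch,
-- then the knowledge loop appending each positive-weight bias key not yet present.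
-- 'isinstance(knowledge.get("vuln_bias"), dict)' / 'isinstance(w, (int, float))' are
-- always true under the type convention when get? returns a value / for an Int weight.
def heuristic_vulns_py (archetype : String) (hints : List String) (status : Int) (ctype : String) (body_snip : String) (knowledge : Option (List (String × List (String × Int)))) : List String :=
  let c0 : List String := []
  let c1 := if archetype = "login" then c0 ++ ["weak_auth", "rate_limit", "2fa_missing"] else c0
  let c2 := if archetype = "search" then c1 ++ ["xss_reflected", "sqli_like"] else c1
  let c3 := if archetype = "upload" then c2 ++ ["upload_bypass", "content_type_mismatch"] else c2
  let c4 := if archetype = "admin" then c3 ++ ["idor", "weak_auth", "csrf"] else c3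
  let c5 := if archetype = "api" then
      (let ca := c4 ++ ["idor", "mass_assignment", "sqli_like"]
       if "graphql" ∈ hints then ca ++ ["graphql_introspection", "graphql_injection"] else ca)
    else c4
  let c6 := if archetype = "callback" then c5 ++ ["open_redirect", "csrf"] else c5
  let c7 := if 500 ≤ status ∧ status ≤ 599 then c6 ++ ["error_leak"] else c6
  let c8 := if PySem.Str.isIn "json" ctype then c7 ++ ["json_misuse"] else c7
  let c9 := match knowledge with
    | none => c8                 -- 'if knowledge' is false for None
    | some kl =>
      if kl = [] then c8 else    -- 'if knowledge' is false for an empty dict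
      match (PySem.Dict.ofList kl).get? "vuln_bias" with
      | none => c8               -- get returned None: isinstance(None, dict) is false
      | some vb =>
        ((PySem.Dict.ofList vb).items).foldl
          (fun acc (p : String × Int) =>
            if p.2 > 0 ∧ p.1 ∉ acc then acc ++ [p.1] else acc) c8
  PySem.List.sorted (PySem.Set.ofList c9) (fun x => x) false

-- ===== PORT B =====
-- module-level inverted index TAG_ARCHETYPES: tag -> archetypes implying it (dict items in order)
def pvTagArchetypes : List (String × List String) :=
  [("weak_auth", ["login", "admin"]),
   ("rate_limit", ["login"]),
   ("2fa_missing", ["login"]),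
   ("xss_reflected", ["search"]),
   ("sqli_like", ["search", "api"]),
   ("upload_bypass", ["upload"]),
   ("content_type_mismatch", ["upload"]),
   ("idor", ["admin", "api"]),
   ("mass_assignment", ["api"]),
   ("csrf", ["admin", "callback"]),
   ("open_redirect", ["callback"])]

def heuristic_vulns_py_alt (archetype : String) (hints : List String) (status : Int) (ctype : String) (body_snip : String) (knowledge : Option (List (String × List (String × Int)))) : List String :=
  -- out = {tag for tag, archs in TAG_ARCHETYPES.items() if archetype in archs}
  let out0 : PySem.Set String :=
    PySem.Set.ofList ((pvTagArchetypes.filter (fun p => archetype ∈ p.2)).map (·.1))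
  let out1 := if archetype = "api" ∧ "graphql" ∈ hints
    then PySem.Set.update out0 ["graphql_introspection", "graphql_injection"] else out0
  let out2 := if 500 ≤ status ∧ status ≤ 599 then PySem.Set.add out1 "error_leak" else out1
  let out3 := if PySem.Str.isIn "json" ctype then PySem.Set.add out2 "json_misuse" else out2
  let out4 := match knowledge with
    | none => out3
    | some kl =>
      if kl = [] then out3 else
      match (PySem.Dict.ofList kl).get? "vuln_bias" with
      | none => out3
      | some vb =>
        PySem.Set.update out3
          ((((PySem.Dict.ofList vb).items).filter (fun p : String × Int => p.2 > 0)).map (fun p : String × Int => p.1))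
  PySem.List.sorted out4 (fun x => x) false

-- ===== PRECONDITION & SPEC =====
def Spec_heuristic_vulns_py (archetype : String) (hints : List String) (status : Int) (ctype : String) (body_snip : String) (knowledge : Option (List (String × List (String × Int)))) (out : List String) : Prop := out = heuristic_vulns_py_alt archetype hints status ctype body_snip knowledge
instance (archetype : String) (hints : List String) (status : Int) (ctype : String) (body_snip : String) (knowledge : Option (List (String × List (String × Int)))) (out : List String) : Decidable (Spec_heuristic_vulns_py archetype hints status ctype body_snip knowledge out) := by unfold Spec_heuristic_vulns_py; infer_instance

-- ===== CLAIM (what is proved, stated in full; the proofs are below) =====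
def Claim_equal_heuristic_vulns_py : Prop := ∀ (archetype : String) (hints : List String) (status : Int) (ctype : String) (body_snip : String) (knowledge : Option (List (String × List (String × Int)))), Dom_heuristic_vulns_py archetype hints status ctype body_snip knowledge → Spec_heuristic_vulns_py archetype hints status ctype body_snip knowledge (heuristic_vulns_py archetype hints status ctype body_snip knowledge)

-- ===== LEMMAS AND PROOFS =====

-- membership in A's guarded append loop over the bias items
theorem mem_bias_foldl (items : List (String × Int)) (acc : List String) (x : String) :
    (x ∈ items.foldl (fun acc (p : String × Int) =>
        if p.2 > 0 ∧ p.1 ∉ acc then acc ++ [p.1] else acc) acc) ↔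
    x ∈ acc ∨ x ∈ (items.filter (fun p : String × Int => p.2 > 0)).map (fun p : String × Int => p.1) := by
  induction items generalizing acc with
  | nil => simp
  | cons p rest ih =>
    simp only [List.foldl_cons, ih, List.filter_cons]
    by_cases hw : p.2 > 0
    · by_cases hm : p.1 ∈ acc
      · simp [hw, hm]
        constructor
        · rintro (h | h) <;> [exact Or.inl h; exact Or.inr (Or.inr h)]
        · rintro (h | h | h)
          · exact Or.inl h
          · exact Or.inl (h ▸ hm)
          · exact Or.inr h
      · simp [hw, hm, List.mem_append, or_assoc]
    · simp [hw]

-- membership in A's archetype if-chain = membership in B's inverted-index set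
theorem mem_base_eq (archetype : String) (hints : List String) (x : String) :
    (x ∈ (let c0 : List String := []
       let c1 := if archetype = "login" then c0 ++ ["weak_auth", "rate_limit", "2fa_missing"] else c0
       let c2 := if archetype = "search" then c1 ++ ["xss_reflected", "sqli_like"] else c1
       let c3 := if archetype = "upload" then c2 ++ ["upload_bypass", "content_type_mismatch"] else c2
       let c4 := if archetype = "admin" then c3 ++ ["idor", "weak_auth", "csrf"] else c3
       let c5 := if archetype = "api" then
           (let ca := c4 ++ ["idor", "mass_assignment", "sqli_like"]
            if "graphql" ∈ hints then ca ++ ["graphql_introspection", "graphql_injection"] else ca)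
         else c4
       if archetype = "callback" then c5 ++ ["open_redirect", "csrf"] else c5)) ↔
    (x ∈ (let out0 : PySem.Set String :=
        PySem.Set.ofList ((pvTagArchetypes.filter (fun p => archetype ∈ p.2)).map (·.1))
      if archetype = "api" ∧ "graphql" ∈ hints
        then PySem.Set.update out0 ["graphql_introspection", "graphql_injection"] else out0)) := by
  by_cases h1 : archetype = "login"
  · subst h1; by_cases hg : "graphql" ∈ hints <;>
      simp [hg, pvTagArchetypes, PySem.Set.mem_ofList]
  · by_cases h2 : archetype = "search"
    · subst h2; by_cases hg : "graphql" ∈ hints <;>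
        simp [hg, pvTagArchetypes, PySem.Set.mem_ofList]
    · by_cases h3 : archetype = "upload"
      · subst h3; by_cases hg : "graphql" ∈ hints <;>
          simp [hg, pvTagArchetypes, PySem.Set.mem_ofList]
      · by_cases h4 : archetype = "admin"
        · subst h4; by_cases hg : "graphql" ∈ hints <;>
            simp [hg, pvTagArchetypes, PySem.Set.mem_ofList] <;> tauto
        · by_cases h5 : archetype = "api"
          · subst h5; by_cases hg : "graphql" ∈ hints <;>
              simp [hg, pvTagArchetypes, PySem.Set.mem_ofList] <;> tauto
          · by_cases h6 : archetype = "callback"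
            · subst h6; by_cases hg : "graphql" ∈ hints <;>
                simp [hg, h5, pvTagArchetypes, PySem.Set.mem_ofList] <;> tauto
            · simp [h1, h2, h3, h4, h5, h6, pvTagArchetypes]

-- lifting a membership iff through the status / json / knowledge stages of both versions
theorem mem_stages (A6 : List String) (B1 : PySem.Set String) (status : Int) (ctype : String)
    (knowledge : Option (List (String × List (String × Int))))
    (hbase : ∀ y, y ∈ A6 ↔ y ∈ B1) (x : String) :
    (x ∈ (let c7 := if 500 ≤ status ∧ status ≤ 599 then A6 ++ ["error_leak"] else A6
       let c8 := if PySem.Str.isIn "json" ctype then c7 ++ ["json_misuse"] else c7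
       match knowledge with
       | none => c8
       | some kl =>
         if kl = [] then c8 else
         match (PySem.Dict.ofList kl).get? "vuln_bias" with
         | none => c8
         | some vb =>
           ((PySem.Dict.ofList vb).items).foldl
             (fun acc (p : String × Int) =>
               if p.2 > 0 ∧ p.1 ∉ acc then acc ++ [p.1] else acc) c8)) ↔
    (x ∈ (let out2 := if 500 ≤ status ∧ status ≤ 599 then PySem.Set.add B1 "error_leak" else B1
       let out3 := if PySem.Str.isIn "json" ctype then PySem.Set.add out2 "json_misuse" else out2
       match knowledge with
       | none => out3
       | some kl =>
         if kl = [] then out3 else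
         match (PySem.Dict.ofList kl).get? "vuln_bias" with
         | none => out3
         | some vb =>
           PySem.Set.update out3
             ((((PySem.Dict.ofList vb).items).filter (fun p : String × Int => p.2 > 0)).map (fun p : String × Int => p.1)))) := by
  have hs2 : ∀ y, y ∈ (if 500 ≤ status ∧ status ≤ 599 then A6 ++ ["error_leak"] else A6) ↔
      y ∈ (if 500 ≤ status ∧ status ≤ 599 then PySem.Set.add B1 "error_leak" else B1) := by
    intro y; split <;> simp [PySem.Set.mem_add, hbase y]
  have hs3 : ∀ y, y ∈ (let c7 := if 500 ≤ status ∧ status ≤ 599 then A6 ++ ["error_leak"] else A6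
        if PySem.Str.isIn "json" ctype then c7 ++ ["json_misuse"] else c7) ↔
      y ∈ (let out2 := if 500 ≤ status ∧ status ≤ 599 then PySem.Set.add B1 "error_leak" else B1
        if PySem.Str.isIn "json" ctype then PySem.Set.add out2 "json_misuse" else out2) := by
    intro y; simp only; split <;> simp [PySem.Set.mem_add, hs2 y]
  simp only
  cases knowledge with
  | none => exact hs3 x
  | some kl =>
    by_cases hkl : kl = []
    · simp only [hkl, if_true]; exact hs3 x
    · simp only [hkl, if_false]
      cases (PySem.Dict.ofList kl).get? "vuln_bias" with
      | none => exact hs3 x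
      | some vb =>
        rw [mem_bias_foldl, PySem.Set.mem_update, hs3 x]

-- the final candidate list and candidate set have the same elements
theorem mem_cand_eq (archetype : String) (hints : List String) (status : Int)
    (ctype : String) (body_snip : String)
    (knowledge : Option (List (String × List (String × Int)))) (x : String) :
    (x ∈ heuristic_vulns_py archetype hints status ctype body_snip knowledge) ↔
    x ∈ heuristic_vulns_py_alt archetype hints status ctype body_snip knowledge := by
  unfold heuristic_vulns_py heuristic_vulns_py_alt
  simp only [PySem.List.mem_sorted, PySem.Set.mem_ofList]
  exact mem_stages _ _ status ctype knowledge (fun y => mem_base_eq archetype hints y) x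

-- B's candidate set stays duplicate-free through the stages (it is built by Set operations)
theorem nodup_stages (B1 : PySem.Set String) (status : Int) (ctype : String)
    (knowledge : Option (List (String × List (String × Int)))) (hB : B1.Nodup) :
    (let out2 := if 500 ≤ status ∧ status ≤ 599 then PySem.Set.add B1 "error_leak" else B1
     let out3 := if PySem.Str.isIn "json" ctype then PySem.Set.add out2 "json_misuse" else out2
     match knowledge with
     | none => out3
     | some kl =>
       if kl = [] then out3 else
       match (PySem.Dict.ofList kl).get? "vuln_bias" with
       | none => out3
       | some vb =>
         PySem.Set.update out3
           ((((PySem.Dict.ofList vb).items).filter (fun p : String × Int => p.2 > 0)).map (fun p : String × Int => p.1))).Nodup := by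
  have h2 : (if 500 ≤ status ∧ status ≤ 599 then PySem.Set.add B1 "error_leak" else B1).Nodup := by
    split <;> [exact PySem.Set.nodup_add _ _ hB; exact hB]
  have h3 : (let out2 := if 500 ≤ status ∧ status ≤ 599 then PySem.Set.add B1 "error_leak" else B1
      if PySem.Str.isIn "json" ctype then PySem.Set.add out2 "json_misuse" else out2).Nodup := by
    simp only; split <;> [exact PySem.Set.nodup_add _ _ h2; exact h2]
  simp only
  cases knowledge with
  | none => exact h3
  | some kl =>
    by_cases hkl : kl = []
    · simpa [hkl] using h3
    · simp only [hkl, if_false]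
      cases (PySem.Dict.ofList kl).get? "vuln_bias" with
      | none => exact h3
      | some vb => exact PySem.Set.nodup_update _ _ h3

-- ===== VERDICT (by name: the statement is the Claim_ definition above) =====
theorem heuristic_vulns_py_spec : Claim_equal_heuristic_vulns_py := by
  intro archetype hints status ctype body_snip knowledge _
  unfold Spec_heuristic_vulns_py
  have hmem := mem_cand_eq archetype hints status ctype body_snip knowledge
  have hnd : (let out0 : PySem.Set String :=
        PySem.Set.ofList ((pvTagArchetypes.filter (fun p : String × List String => archetype ∈ p.2)).map (fun p : String × List String => p.1))
      let out1 := if archetype = "api" ∧ "graphql" ∈ hints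
        then PySem.Set.update out0 ["graphql_introspection", "graphql_injection"] else out0
      let out2 := if 500 ≤ status ∧ status ≤ 599 then PySem.Set.add out1 "error_leak" else out1
      let out3 := if PySem.Str.isIn "json" ctype then PySem.Set.add out2 "json_misuse" else out2
      match knowledge with
      | none => out3
      | some kl =>
        if kl = [] then out3 else
        match (PySem.Dict.ofList kl).get? "vuln_bias" with
        | none => out3
        | some vb =>
          PySem.Set.update out3
            ((((PySem.Dict.ofList vb).items).filter (fun p : String × Int => p.2 > 0)).map (fun p : String × Int => p.1))).Nodup := by
    apply nodup_stages
    split <;> [exact PySem.Set.nodup_update _ _ (PySem.Set.nodup_ofList _); exact PySem.Set.nodup_ofList _]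
  unfold heuristic_vulns_py heuristic_vulns_py_alt at hmem ⊢
  apply PySem.List.sorted_eq_sorted_of_perm _ _ _ (fun a b h => h)
  rw [List.perm_ext_iff_of_nodup (PySem.Set.nodup_ofList _) hnd]
  intro a
  have := hmem a
  simpa [heuristic_vulns_py, heuristic_vulns_py_alt, PySem.List.mem_sorted,
    PySem.Set.mem_ofList] using this
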